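-- pv_equiv track=rewrite | github.com/ykdy3951/codetree-TILs | 241219/두 가지로 열리는 자물쇠/a-two-way-lock.py | count_unlock_combinations
-- ===== SOURCE A (Python) =====
-- def is_within_distance(x, y, N):
--     return abs(x - y) <= 2 or abs(x - y) >= N - 2
--
-- def count_unlock_combinations(N, combo1, combo2):
--     count = 0
--
--     for x in range(1, N + 1):
--         for y in range(1, N + 1):
--             for z in range(1, N + 1):
--                 if (
--                     (is_within_distance(x, combo1[0], N) and
--                         is_within_distance(y, combo1[1], N) and
--                         is_within_distance(z, combo1[2], N)) or
--                     (is_within_distance(x, combo2[0], N) and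
--                         is_within_distance(y, combo2[1], N) and
--                         is_within_distance(z, combo2[2], N))
--                 ):
--                     count += 1
--
--     return count
-- ===== SOURCE B (Python) =====
-- def _near(x, c, N):
--     return abs(x - c) <= 2 or abs(x - c) >= N - 2
--
-- def count_unlock_combinations(N, combo1, combo2):
--     # Inclusion-exclusion: |box1 U box2| = |box1| + |box2| - |box1 n box2|;
--     # each box is a product of independent per-coordinate sets, so count
--     # each coordinate once over the dial instead of enumerating triples.
--     if N <= 0:
--         return 0
--     prod1 = prod2 = prod_both = 1
--     for i in range(3):
--         c1 = c2 = both = 0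
--         for v in range(1, N + 1):
--             d1 = _near(v, combo1[i], N)
--             d2 = _near(v, combo2[i], N)
--             if d1:
--                 c1 += 1
--             if d2:
--                 c2 += 1
--             if d1 and d2:
--                 both += 1
--         prod1 *= c1
--         prod2 *= c2
--         prod_both *= both
--     return prod1 + prod2 - prod_both
-- ===== Notes on version B (the rewrite author's own statement) =====
-- stated objective: faster
-- what changed: Replaces the O(N^3) enumeration of all dial triples by inclusion-exclusion over the two boxes, counting each of the three coordinates independently in a single O(N) pass and combining per-coordinate counts as |A|+|B|-|A∩B| products.
-- outside the precondition, e.g. on count_unlock_combinations(5, [100, 100, 100], []): A returns 125, B raises IndexError; on count_unlock_combinations(3, [1, 2], [1, 2, 3]): A raises IndexError, B raises IndexError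
import Mathlib
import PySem

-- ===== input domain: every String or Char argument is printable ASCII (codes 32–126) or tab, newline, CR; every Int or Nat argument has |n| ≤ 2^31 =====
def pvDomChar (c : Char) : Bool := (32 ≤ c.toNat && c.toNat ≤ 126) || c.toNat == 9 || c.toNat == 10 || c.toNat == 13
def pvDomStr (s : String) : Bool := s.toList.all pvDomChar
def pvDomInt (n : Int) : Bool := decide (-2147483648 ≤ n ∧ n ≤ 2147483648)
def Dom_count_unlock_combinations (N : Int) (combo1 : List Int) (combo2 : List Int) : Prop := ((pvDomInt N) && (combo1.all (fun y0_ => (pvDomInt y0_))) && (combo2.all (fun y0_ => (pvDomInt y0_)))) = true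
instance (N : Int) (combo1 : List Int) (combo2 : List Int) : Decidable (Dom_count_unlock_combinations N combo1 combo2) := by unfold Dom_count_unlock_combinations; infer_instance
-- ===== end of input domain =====

-- B replaces A's O(N^3) triple enumeration by inclusion-exclusion over per-coordinate counts (one O(N) pass); objective: faster.

-- ===== PORT A =====
-- is_within_distance(x, y, N)
def pvNear (x y N : Int) : Bool := decide (|x - y| ≤ 2) || decide (|x - y| ≥ N - 2)

def count_unlock_combinations (N : Int) (combo1 : List Int) (combo2 : List Int) : Int :=
  (PySem.List.pyRange 1 (N + 1) 1).foldl (fun count x =>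
    (PySem.List.pyRange 1 (N + 1) 1).foldl (fun count y =>
      (PySem.List.pyRange 1 (N + 1) 1).foldl (fun count z =>
        if (pvNear x (PySem.List.pyGetD combo1 0 0) N &&
            pvNear y (PySem.List.pyGetD combo1 1 0) N &&
            pvNear z (PySem.List.pyGetD combo1 2 0) N) ||
           (pvNear x (PySem.List.pyGetD combo2 0 0) N &&
            pvNear y (PySem.List.pyGetD combo2 1 0) N &&
            pvNear z (PySem.List.pyGetD combo2 2 0) N)
        then count + 1 else count) count) count) 0

-- ===== PORT B =====
-- _near(x, c, N)
def pvNearAlt (x c N : Int) : Bool := decide (|x - c| ≤ 2) || decide (|x - c| ≥ N - 2)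

def count_unlock_combinations_alt (N : Int) (combo1 : List Int) (combo2 : List Int) : Int :=
  if N ≤ 0 then 0
  else
    let t := (PySem.List.pyRange 0 3 1).foldl (fun (t : Int × Int × Int) i =>
      let s := (PySem.List.pyRange 1 (N + 1) 1).foldl (fun (s : Int × Int × Int) v =>
        let d1 := pvNearAlt v (PySem.List.pyGetD combo1 i 0) N
        let d2 := pvNearAlt v (PySem.List.pyGetD combo2 i 0) N
        (s.1 + (if d1 then 1 else 0),
         s.2.1 + (if d2 then 1 else 0),
         s.2.2 + (if d1 && d2 then 1 else 0))) (0, 0, 0)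
      (t.1 * s.1, t.2.1 * s.2.1, t.2.2 * s.2.2)) (1, 1, 1)
    t.1 + t.2.1 - t.2.2

-- ===== PRECONDITION & SPEC =====
-- Pre_ excludes combo lists shorter than 3 when N ≥ 1: A then raises IndexError on almost all such
-- inputs, except when its first clause holds for every triple (short-circuit never reads combo2) —
-- there A returns N^3 while B's unconditional indexing raises IndexError.
def Pre_count_unlock_combinations (N : Int) (combo1 : List Int) (combo2 : List Int) : Prop :=
  N ≤ 0 ∨ (3 ≤ combo1.length ∧ 3 ≤ combo2.length)
instance (N : Int) (combo1 : List Int) (combo2 : List Int) : Decidable (Pre_count_unlock_combinations N combo1 combo2) := by unfold Pre_count_unlock_combinations; infer_instance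

def pvWitness_count_unlock_combinations : Int × List Int × List Int := (3, [1, 2, 3], [2, 3, 4])

def Spec_count_unlock_combinations (N : Int) (combo1 : List Int) (combo2 : List Int) (out : Int) : Prop := out = count_unlock_combinations_alt N combo1 combo2
instance (N : Int) (combo1 : List Int) (combo2 : List Int) (out : Int) : Decidable (Spec_count_unlock_combinations N combo1 combo2 out) := by unfold Spec_count_unlock_combinations; infer_instance

-- ===== CLAIM (what is proved, stated in full; the proofs are below) =====
def Claim_equal_count_unlock_combinations : Prop := ∀ (N : Int) (combo1 : List Int) (combo2 : List Int), Dom_count_unlock_combinations N combo1 combo2 → Pre_count_unlock_combinations N combo1 combo2 → Spec_count_unlock_combinations N combo1 combo2 (count_unlock_combinations N combo1 combo2)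

-- ===== LEMMAS AND PROOFS =====

-- one variable: sum over z of [ (a and p z) or (b and q z) ]
lemma pv_key1 (L : List Int) (a b : Bool) (p q : Int → Bool) :
    (L.map (fun z => if (a && p z) || (b && q z) then (1 : Int) else 0)).sum
    = (if a then 1 else 0) * L.countP p + (if b then 1 else 0) * L.countP q
      - (if a && b then 1 else 0) * L.countP (fun z => p z && q z) := by
  induction L with
  | nil => simp
  | cons h t ih =>
    simp only [List.map_cons, List.sum_cons, List.countP_cons, ih]
    cases a <;> cases b <;> cases hp : p h <;> cases hq : q h <;>
      simp <;> ring

-- second variable folded against constant factors Cp/Cq/Cr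
lemma pv_key2 (L : List Int) (a b : Bool) (p q : Int → Bool) (Cp Cq Cr : Int) :
    (L.map (fun y => (if a && p y then (1 : Int) else 0) * Cp
        + (if b && q y then (1 : Int) else 0) * Cq
        - (if (a && p y) && (b && q y) then (1 : Int) else 0) * Cr)).sum
    = (if a then 1 else 0) * (↑(L.countP p) * Cp) + (if b then 1 else 0) * (↑(L.countP q) * Cq)
      - (if a && b then 1 else 0) * (↑(L.countP (fun y => p y && q y)) * Cr) := by
  induction L with
  | nil => simp
  | cons h t ih =>
    simp only [List.map_cons, List.sum_cons, List.countP_cons, ih]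
    cases a <;> cases b <;> cases hp : p h <;> cases hq : q h <;>
      simp <;> ring

-- outermost variable
lemma pv_key3 (L : List Int) (p q : Int → Bool) (Cp Cq Cr : Int) :
    (L.map (fun x => (if p x then (1 : Int) else 0) * Cp
        + (if q x then (1 : Int) else 0) * Cq
        - (if p x && q x then (1 : Int) else 0) * Cr)).sum
    = ↑(L.countP p) * Cp + ↑(L.countP q) * Cq - ↑(L.countP (fun x => p x && q x)) * Cr := by
  induction L with
  | nil => simp
  | cons h t ih =>
    simp only [List.map_cons, List.sum_cons, List.countP_cons, ih]
    cases hp : p h <;> cases hq : q h <;> simp <;> ring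

-- A's triple loop factorizes by inclusion-exclusion into per-coordinate counts
lemma pv_triple_sum (L : List Int) (p1 p2 p3 q1 q2 q3 : Int → Bool) :
    L.foldl (fun count x => L.foldl (fun count y => L.foldl (fun count z =>
        if (p1 x && p2 y && p3 z) || (q1 x && q2 y && q3 z) then count + 1 else count)
      count) count) (0 : Int)
    = ↑(L.countP p1) * ↑(L.countP p2) * ↑(L.countP p3)
      + ↑(L.countP q1) * ↑(L.countP q2) * ↑(L.countP q3)
      - ↑(L.countP (fun v => p1 v && q1 v)) * ↑(L.countP (fun v => p2 v && q2 v))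
        * ↑(L.countP (fun v => p3 v && q3 v)) := by
  have hz : ∀ (x y c : Int), L.foldl (fun count z =>
      if (p1 x && p2 y && p3 z) || (q1 x && q2 y && q3 z) then count + 1 else count) c
      = c + ↑(L.countP (fun z => (p1 x && p2 y && p3 z) || (q1 x && q2 y && q3 z))) :=
    fun x y c => PySem.List.foldl_if_add_one _ _ _
  have hy : ∀ (x c : Int), L.foldl (fun count y => L.foldl (fun count z =>
      if (p1 x && p2 y && p3 z) || (q1 x && q2 y && q3 z) then count + 1 else count) count) c
      = c + (L.map (fun y =>
          (↑(L.countP (fun z => (p1 x && p2 y && p3 z) || (q1 x && q2 y && q3 z))) : Int))).sum := by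
    intro x c
    rw [PySem.List.foldl_congr_mem L _
      (fun count y => count + (↑(L.countP (fun z =>
        (p1 x && p2 y && p3 z) || (q1 x && q2 y && q3 z))) : Int)) c
      (fun acc y _ => hz x y acc)]
    exact PySem.List.foldl_add _ _ _
  rw [PySem.List.foldl_congr_mem L _
    (fun count x => count + (L.map (fun y =>
      (↑(L.countP (fun z => (p1 x && p2 y && p3 z) || (q1 x && q2 y && q3 z))) : Int))).sum) 0
    (fun acc x _ => hy x acc), PySem.List.foldl_add, zero_add]
  have hcnt : ∀ x y, (↑(L.countP (fun z => (p1 x && p2 y && p3 z) || (q1 x && q2 y && q3 z))) : Int)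
      = (if p1 x && p2 y then 1 else 0) * ↑(L.countP p3)
        + (if q1 x && q2 y then 1 else 0) * ↑(L.countP q3)
        - (if (p1 x && p2 y) && (q1 x && q2 y) then 1 else 0) * ↑(L.countP (fun z => p3 z && q3 z)) := by
    intro x y
    have he : L.countP (fun z => (p1 x && p2 y && p3 z) || (q1 x && q2 y && q3 z))
        = L.countP (fun z => ((p1 x && p2 y) && p3 z) || ((q1 x && q2 y) && q3 z)) := by
      apply List.countP_congr; intro z _; rw [Bool.and_assoc, Bool.and_assoc]
    rw [he, ← PySem.List.sum_map_ite_one_zero, pv_key1]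
  simp only [hcnt]
  have hmid : ∀ x, (L.map (fun y => (if p1 x && p2 y then (1 : Int) else 0) * ↑(L.countP p3)
        + (if q1 x && q2 y then (1 : Int) else 0) * ↑(L.countP q3)
        - (if (p1 x && p2 y) && (q1 x && q2 y) then (1 : Int) else 0)
            * ↑(L.countP (fun z => p3 z && q3 z)))).sum
      = (if p1 x then 1 else 0) * (↑(L.countP p2) * ↑(L.countP p3))
        + (if q1 x then 1 else 0) * (↑(L.countP q2) * ↑(L.countP q3))
        - (if p1 x && q1 x then 1 else 0)
            * (↑(L.countP (fun y => p2 y && q2 y)) * ↑(L.countP (fun z => p3 z && q3 z))) :=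
    fun x => pv_key2 L (p1 x) (q1 x) p2 q2 _ _ _
  simp only [hmid, pv_key3]
  ring

-- B's inner loop: the three accumulators are the three per-coordinate counts
lemma pv_foldl_triple (L : List Int) (d1 d2 : Int → Bool) (s : Int × Int × Int) :
    L.foldl (fun s v =>
        (s.1 + (if d1 v then (1 : Int) else 0),
         s.2.1 + (if d2 v then (1 : Int) else 0),
         s.2.2 + (if d1 v && d2 v then (1 : Int) else 0))) s
    = (s.1 + L.countP d1, s.2.1 + L.countP d2, s.2.2 + L.countP (fun v => d1 v && d2 v)) := by
  induction L generalizing s with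
  | nil => simp
  | cons h t ih =>
    simp only [List.foldl_cons, ih, List.countP_cons]
    cases hd1 : d1 h <;> cases hd2 : d2 h <;>
      refine Prod.ext ?_ (Prod.ext ?_ ?_) <;> simp <;> ring

-- ===== VERDICT (by name: the statement is the Claim_ definition above) =====
theorem count_unlock_combinations_spec : Claim_equal_count_unlock_combinations := by
  intro N combo1 combo2 _ _
  unfold Spec_count_unlock_combinations count_unlock_combinations count_unlock_combinations_alt
  by_cases hN : N ≤ 0
  · have hnil : PySem.List.pyRange 1 (N + 1) 1 = [] :=
      PySem.List.pyRange_one_eq_nil (by omega)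
    simp [hnil, hN]
  · simp only [if_neg hN]
    have h3 : PySem.List.pyRange 0 3 1 = [0, 1, 2] := by decide
    rw [h3]
    simp only [List.foldl_cons, List.foldl_nil, pv_foldl_triple]
    have hpv : pvNearAlt = pvNear := rfl
    have hA := pv_triple_sum (PySem.List.pyRange 1 (N + 1) 1)
      (fun v => pvNear v (PySem.List.pyGetD combo1 0 0) N)
      (fun v => pvNear v (PySem.List.pyGetD combo1 1 0) N)
      (fun v => pvNear v (PySem.List.pyGetD combo1 2 0) N)
      (fun v => pvNear v (PySem.List.pyGetD combo2 0 0) N)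
      (fun v => pvNear v (PySem.List.pyGetD combo2 1 0) N)
      (fun v => pvNear v (PySem.List.pyGetD combo2 2 0) N)
    refine hA.trans ?_
    rw [hpv]
    ring
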